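-- pv_equiv track=rewrite | github.com/pypi-data/pypi-mirror-396 | packages/gitlab-ps-utils/gitlab_ps_utils-0.17.0.tar.gz/gitlab_ps_utils-0.17.0/gitlab_ps_utils/misc_utils.py | remove_dupes_but_take_higher_access
-- ===== SOURCE A (Python) =====
-- from copy import deepcopy
--
-- def remove_dupes_but_take_higher_access(my_list):
--     """
--         Deduping function for keeping members with higher access
--     """
--     already_found = {}
--     new_list = []
--     for d in my_list:
--         obj_id = d["id"]
--         if already_found.get(obj_id):
--             if already_found[obj_id]["access_level"] < d["access_level"]:
--                 c = deepcopy(d)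
--                 c["index"] = already_found[obj_id]["index"]
--                 new_list[already_found[obj_id]["index"]] = c
--                 already_found[obj_id] = c
--         else:
--             already_found[obj_id] = deepcopy(d)
--             new_list.append(d)
--             already_found[obj_id]["index"] = len(new_list) - 1
--     return new_list
-- ===== SOURCE B (Python) =====
-- def remove_dupes_but_take_higher_access(my_list):
--     """
--         Deduping function for keeping members with higher access
--     """
--     order = []
--     groups = {}
--     for d in my_list:
--         obj_id = d["id"]
--         if obj_id in groups:
--             groups[obj_id].append(d)
--         else:
--             groups[obj_id] = [d]
--             order.append(obj_id)
--     new_list = []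
--     for obj_id in order:
--         group = groups[obj_id]
--         winner = group[0]
--         upgraded = False
--         for d in group[1:]:
--             if winner["access_level"] < d["access_level"]:
--                 winner = d
--                 upgraded = True
--         if upgraded:
--             c = dict(winner)
--             c["index"] = len(new_list)
--             new_list.append(c)
--         else:
--             new_list.append(group[0])
--     return new_list
-- ===== Notes on version B (the rewrite author's own statement) =====
-- stated objective: alternative
-- what changed: Replaces A's single pass with a running-max dict and in-place list patching by a two-phase group-then-resolve: first group all dicts by id in first-seen order, then emit one winner per group (first maximum by access_level), copying and tagging with an index only when the winner is not the group's first element.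
import Mathlib
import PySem

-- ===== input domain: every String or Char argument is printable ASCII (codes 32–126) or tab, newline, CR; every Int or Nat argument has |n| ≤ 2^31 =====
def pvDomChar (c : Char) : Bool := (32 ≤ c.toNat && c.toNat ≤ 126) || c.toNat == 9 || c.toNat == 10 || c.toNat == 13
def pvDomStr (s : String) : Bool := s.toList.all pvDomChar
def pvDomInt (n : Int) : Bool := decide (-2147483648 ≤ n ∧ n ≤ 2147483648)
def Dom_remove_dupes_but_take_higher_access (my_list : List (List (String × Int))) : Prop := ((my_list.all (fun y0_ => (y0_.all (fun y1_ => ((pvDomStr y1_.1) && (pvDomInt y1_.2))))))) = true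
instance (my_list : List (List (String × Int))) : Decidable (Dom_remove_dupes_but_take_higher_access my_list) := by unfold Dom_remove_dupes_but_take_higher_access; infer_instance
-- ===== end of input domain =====

-- B replaces A's single running-max pass (with in-place patching of the output list) by
-- group-by-id then resolve-each-group; equal return value, no speed claim (both are one-pass linear).

-- dict-of-ints primitives shared by both ports: d[k] lookup (first match) and d[k] = v
-- (overwrite in place, else append), exactly Python dict semantics via PySem.Dict.
def dGet (d : List (String × Int)) (k : String) : Int := (PySem.Dict.mk d).getD k 0
def dSet (d : List (String × Int)) (k : String) (v : Int) : List (String × Int) :=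
  ((PySem.Dict.mk d).insert k v).items

-- ===== PORT A =====
def remove_dupes_but_take_higher_access (my_list : List (List (String × Int))) : List (List (String × Int)) :=
  (my_list.foldl (fun (st : PySem.Dict Int (List (String × Int)) × List (List (String × Int))) d =>
      let objId := dGet d "id"
      match st.1.get? objId with
      | some prev =>
          if dGet prev "access_level" < dGet d "access_level" then
            let c := dSet d "index" (dGet prev "index")
            (st.1.insert objId c, st.2.set (dGet prev "index").toNat c)
          else st
      | none =>
          let nl := st.2 ++ [d]
          (st.1.insert objId (dSet d "index" ((nl.length : Int) - 1)), nl))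
    (PySem.Dict.empty, [])).2

-- ===== PORT B =====
def remove_dupes_but_take_higher_access_alt (my_list : List (List (String × Int))) : List (List (String × Int)) :=
  let og := my_list.foldl (fun (st : List Int × PySem.Dict Int (List (List (String × Int)))) d =>
      let objId := dGet d "id"
      match st.2.get? objId with
      | some g => (st.1, st.2.insert objId (g ++ [d]))
      | none => (st.1 ++ [objId], st.2.insert objId [d]))
    ([], PySem.Dict.empty)
  og.1.foldl (fun nl objId =>
      match og.2.getD objId [] with
      | [] => nl  -- unreachable (every stored group is nonempty); totality guard for Python's group[0]
      | g0 :: rest =>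
          let wu := rest.foldl (fun (wu : List (String × Int) × Bool) d =>
              if dGet wu.1 "access_level" < dGet d "access_level" then (d, true) else wu) (g0, false)
          if wu.2 then nl ++ [dSet wu.1 "index" (nl.length : Int)] else nl ++ [g0]) []

-- ===== PRECONDITION & SPEC =====
-- Pre_ = exactly where the Python A returns: every dict needs an "id" key, and every dict whose
-- id occurs more than once needs an "access_level" key (otherwise A raises KeyError).
def Pre_remove_dupes_but_take_higher_access (my_list : List (List (String × Int))) : Prop :=
  ∀ d ∈ my_list, "id" ∈ d.map Prod.fst ∧
    (1 < my_list.countP (fun e => dGet e "id" == dGet d "id") → "access_level" ∈ d.map Prod.fst)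
instance (my_list : List (List (String × Int))) : Decidable (Pre_remove_dupes_but_take_higher_access my_list) := by
  unfold Pre_remove_dupes_but_take_higher_access; infer_instance

def pvWitness_remove_dupes_but_take_higher_access : (List (List (String × Int))) :=
  [[("id", 1), ("access_level", 2)], [("id", 2), ("name", 7)], [("id", 1), ("access_level", 3)]]

def Spec_remove_dupes_but_take_higher_access (my_list : List (List (String × Int))) (out : List (List (String × Int))) : Prop := out = remove_dupes_but_take_higher_access_alt my_list
instance (my_list : List (List (String × Int))) (out : List (List (String × Int))) : Decidable (Spec_remove_dupes_but_take_higher_access my_list out) := by unfold Spec_remove_dupes_but_take_higher_access; infer_instance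

-- ===== CLAIM (what is proved, stated in full; the proofs are below) =====
def Claim_equal_remove_dupes_but_take_higher_access : Prop := ∀ (my_list : List (List (String × Int))), Dom_remove_dupes_but_take_higher_access my_list → Pre_remove_dupes_but_take_higher_access my_list → Spec_remove_dupes_but_take_higher_access my_list (remove_dupes_but_take_higher_access my_list)

-- ===== LEMMAS AND PROOFS =====

-- the common model: ids in first-seen order, groups, first-max winner, resolved output
def keyOf (d : List (String × Int)) : Int := dGet d "id"
def accOf (d : List (String × Int)) : Int := dGet d "access_level"

def idsStep (acc : List Int) (d : List (String × Int)) : List Int :=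
  if keyOf d ∈ acc then acc else acc ++ [keyOf d]
def pvIds (l : List (List (String × Int))) : List Int := l.foldl idsStep []
def pvGrp (i : Int) (l : List (List (String × Int))) : List (List (String × Int)) :=
  l.filter (fun d => keyOf d == i)

def winStep (wu : List (String × Int) × Bool) (d : List (String × Int)) : List (String × Int) × Bool :=
  if dGet wu.1 "access_level" < dGet d "access_level" then (d, true) else wu
def winFold (g : List (List (String × Int))) : List (String × Int) × Bool :=
  match g with
  | [] => ([], false)
  | g0 :: rest => rest.foldl winStep (g0, false)
def pvEntry (g : List (List (String × Int))) (p : Int) : List (String × Int) :=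
  match g with
  | [] => []
  | g0 :: _ => if (winFold g).2 then dSet (winFold g).1 "index" p else g0
def pvOut (l : List (List (String × Int))) : List (List (String × Int)) :=
  (PySem.List.enumerate (pvIds l) 0).map (fun pi => pvEntry (pvGrp pi.2 l) pi.1)

theorem dGet_dSet (d : List (String × Int)) (k k' : String) (v : Int) :
    dGet (dSet d k v) k' = if k' = k then v else dGet d k' := by
  show ((PySem.Dict.mk d).insert k v).getD k' 0 = _
  rw [PySem.Dict.getD_insert]; rfl

theorem pvIds_append (l : List (List (String × Int))) (d : List (String × Int)) :
    pvIds (l ++ [d]) = idsStep (pvIds l) d := by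
  simp [pvIds, List.foldl_append]

theorem pvGrp_append (i : Int) (l : List (List (String × Int))) (d : List (String × Int)) :
    pvGrp i (l ++ [d]) = pvGrp i l ++ if keyOf d == i then [d] else [] := by
  by_cases h : keyOf d = i <;> simp [pvGrp, List.filter_append, h]

theorem mem_pvIds (i : Int) (l : List (List (String × Int))) :
    i ∈ pvIds l ↔ ∃ d ∈ l, keyOf d = i := by
  induction l using List.reverseRecOn with
  | nil => simp [pvIds]
  | append_singleton l d ih =>
    rw [pvIds_append, idsStep]
    by_cases h : keyOf d ∈ pvIds l
    · rw [if_pos h, ih]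
      constructor
      · rintro ⟨e, he, hk⟩; exact ⟨e, by simp [he], hk⟩
      · rintro ⟨e, he, hk⟩
        rcases List.mem_append.1 he with h1 | h1
        · exact ⟨e, h1, hk⟩
        · rw [List.mem_singleton] at h1; subst h1; exact ih.1 (hk ▸ h)
    · rw [if_neg h]
      simp only [List.mem_append, List.mem_singleton, ih]
      constructor
      · rintro (⟨e, he, hk⟩ | h1)
        · exact ⟨e, Or.inl he, hk⟩
        · exact ⟨d, Or.inr rfl, h1.symm⟩
      · rintro ⟨e, he | he, hk⟩
        · exact Or.inl ⟨e, he, hk⟩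
        · subst he; exact Or.inr hk.symm

theorem nodup_pvIds (l : List (List (String × Int))) : (pvIds l).Nodup := by
  induction l using List.reverseRecOn with
  | nil => simp [pvIds]
  | append_singleton l d ih =>
    rw [pvIds_append, idsStep]
    by_cases h : keyOf d ∈ pvIds l
    · rw [if_pos h]; exact ih
    · rw [if_neg h]
      simp only [List.nodup_append, List.nodup_singleton, true_and, ih]
      intro a ha b hb
      rw [List.mem_singleton] at hb
      subst hb
      exact fun e => h (e ▸ ha)

theorem pvGrp_eq_nil (i : Int) (l : List (List (String × Int))) (h : i ∉ pvIds l) :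
    pvGrp i l = [] := by
  rw [pvGrp, List.filter_eq_nil_iff]
  intro d hd hk
  exact h ((mem_pvIds i l).2 ⟨d, hd, by simpa using hk⟩)

theorem length_pvOut (l : List (List (String × Int))) : (pvOut l).length = (pvIds l).length := by
  simp [pvOut, PySem.List.length_enumerate]

theorem pvOut_getElem (l : List (List (String × Int))) (k : Nat) (hk : k < (pvIds l).length) :
    (pvOut l)[k]'(by rw [length_pvOut]; exact hk) = pvEntry (pvGrp ((pvIds l)[k]) l) (k : Int) := by
  simp [pvOut, PySem.List.getElem_enumerate]

-- the A-side fold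
def stepA (st : PySem.Dict Int (List (String × Int)) × List (List (String × Int)))
    (d : List (String × Int)) : PySem.Dict Int (List (String × Int)) × List (List (String × Int)) :=
  let objId := dGet d "id"
  match st.1.get? objId with
  | some prev =>
      if dGet prev "access_level" < dGet d "access_level" then
        let c := dSet d "index" (dGet prev "index")
        (st.1.insert objId c, st.2.set (dGet prev "index").toNat c)
      else st
  | none =>
      let nl := st.2 ++ [d]
      (st.1.insert objId (dSet d "index" ((nl.length : Int) - 1)), nl)

def stateA (l : List (List (String × Int))) :
    PySem.Dict Int (List (String × Int)) × List (List (String × Int)) :=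
  l.foldl stepA (PySem.Dict.empty, [])

theorem portA_eq_stateA (my_list : List (List (String × Int))) :
    remove_dupes_but_take_higher_access my_list = (stateA my_list).2 := rfl

theorem invA (l : List (List (String × Int))) :
    (stateA l).2 = pvOut l ∧
    ∀ i : Int, (stateA l).1.get? i =
      (PySem.List.index? (pvIds l) i).map (fun q : Nat => dSet (winFold (pvGrp i l)).1 "index" (q : Int)) := by
  induction l using List.reverseRecOn with
  | nil =>
    refine ⟨rfl, fun i => ?_⟩
    simp [stateA, pvIds, PySem.Dict.get?_empty]
  | append_singleton l d ih =>
    obtain ⟨ihOut, ihAf⟩ := ih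
    have hstep : stateA (l ++ [d]) = stepA (stateA l) d := by
      simp [stateA, List.foldl_append]
    have hkey : dGet d "id" = keyOf d := rfl
    by_cases h : keyOf d ∈ pvIds l
    · -- duplicate id: ids unchanged, the group at keyOf d gains d
      obtain ⟨q, hq⟩ : ∃ q, PySem.List.index? (pvIds l) (keyOf d) = some q := by
        have := (PySem.List.index?_isSome_iff (pvIds l) (keyOf d)).2 h
        exact Option.isSome_iff_exists.1 this
      obtain ⟨hqlt, hqget, -⟩ := PySem.List.getElem_of_index?_eq_some hq
      have hids : pvIds (l ++ [d]) = pvIds l := by rw [pvIds_append, idsStep, if_pos h]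
      have hne : pvGrp (keyOf d) l ≠ [] := by
        obtain ⟨e, he, hk⟩ := (mem_pvIds (keyOf d) l).1 h
        intro hnil
        have : e ∈ pvGrp (keyOf d) l := by
          rw [pvGrp, List.mem_filter]; exact ⟨he, by simp [hk]⟩
        rw [hnil] at this; exact absurd this (List.not_mem_nil)
      obtain ⟨g0, rest, hg⟩ : ∃ g0 rest, pvGrp (keyOf d) l = g0 :: rest := by
        cases hgg : pvGrp (keyOf d) l with
        | nil => exact absurd hgg hne
        | cons a b => exact ⟨a, b, rfl⟩
      have hgrp : pvGrp (keyOf d) (l ++ [d]) = g0 :: (rest ++ [d]) := by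
        rw [pvGrp_append, if_pos (by simp), hg]; rfl
      have hwf : winFold (pvGrp (keyOf d) (l ++ [d])) = winStep (winFold (pvGrp (keyOf d) l)) d := by
        rw [hgrp, hg]
        simp [winFold, List.foldl_append]
      have hprev : (stateA l).1.get? (keyOf d)
          = some (dSet (winFold (pvGrp (keyOf d) l)).1 "index" (q : Int)) := by
        rw [ihAf, hq]; rfl
      have hacc : dGet (dSet (winFold (pvGrp (keyOf d) l)).1 "index" (q : Int)) "access_level"
          = dGet (winFold (pvGrp (keyOf d) l)).1 "access_level" := by
        rw [dGet_dSet, if_neg (by decide)]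
      have hidx : dGet (dSet (winFold (pvGrp (keyOf d) l)).1 "index" (q : Int)) "index" = (q : Int) := by
        rw [dGet_dSet, if_pos rfl]
      have hstep2 : stateA (l ++ [d]) =
          (if dGet (winFold (pvGrp (keyOf d) l)).1 "access_level" < dGet d "access_level" then
            ((stateA l).1.insert (keyOf d) (dSet d "index" (q : Int)),
             (stateA l).2.set q (dSet d "index" (q : Int)))
          else stateA l) := by
        rw [hstep]
        simp only [stepA, hkey, hprev, hacc, hidx, Int.toNat_natCast]
      by_cases hc : dGet (winFold (pvGrp (keyOf d) l)).1 "access_level" < dGet d "access_level"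
      · rw [hstep2, if_pos hc]
        refine ⟨?_, fun i => ?_⟩
        · show (stateA l).2.set q (dSet d "index" (q : Int)) = pvOut (l ++ [d])
          rw [ihOut]
          apply List.ext_getElem
          · rw [List.length_set, length_pvOut, length_pvOut, hids]
          · intro k hk1 hk2
            have hk : k < (pvIds l).length := by rwa [List.length_set, length_pvOut] at hk1
            have hk' : k < (pvIds (l ++ [d])).length := by rwa [hids]
            rw [pvOut_getElem (l ++ [d]) k hk']
            by_cases hkq : k = q
            · subst hkq
              have hval : (pvIds (l ++ [d]))[k] = keyOf d := by
                simp only [hids]; exact hqget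
              rw [hval, List.getElem_set_self, hgrp]
              simp [pvEntry, hgrp ▸ hwf, winStep, hc]
            · have hval : (pvIds (l ++ [d]))[k] = (pvIds l)[k] := by simp only [hids]
              have hkne : (pvIds l)[k] ≠ keyOf d := by
                intro he
                exact hkq ((List.Nodup.getElem_inj_iff (nodup_pvIds l)).1 (he.trans hqget.symm))
              rw [hval, List.getElem_set_ne (by omega)]
              have : pvGrp ((pvIds l)[k]) (l ++ [d]) = pvGrp ((pvIds l)[k]) l := by
                rw [pvGrp_append, if_neg (by simp only [beq_iff_eq]; exact fun e => hkne e.symm), List.append_nil]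
              rw [this, ← pvOut_getElem l k hk]
        · show ((stateA l).1.insert (keyOf d) (dSet d "index" (q : Int))).get? i = _
          rw [PySem.Dict.get?_insert]
          by_cases hi : i = keyOf d
          · subst hi
            rw [if_pos rfl, hids, hq, hwf]
            simp [winStep, hc]
          · rw [if_neg hi, ihAf i, hids]
            have : pvGrp i (l ++ [d]) = pvGrp i l := by
              rw [pvGrp_append, if_neg (by simp only [beq_iff_eq]; exact fun e => hi e.symm), List.append_nil]
            rw [this]
      · rw [hstep2, if_neg hc]
        refine ⟨?_, fun i => ?_⟩
        · rw [ihOut]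
          apply List.ext_getElem
          · rw [length_pvOut, length_pvOut, hids]
          · intro k hk1 hk2
            have hk : k < (pvIds l).length := by rwa [length_pvOut] at hk1
            have hk' : k < (pvIds (l ++ [d])).length := by rwa [hids]
            rw [pvOut_getElem l k hk, pvOut_getElem (l ++ [d]) k hk']
            have hval : (pvIds (l ++ [d]))[k] = (pvIds l)[k] := by simp only [hids]
            rw [hval]
            by_cases hkd : (pvIds l)[k] = keyOf d
            · have hc2 : ¬ dGet (winFold (g0 :: rest)).1 "access_level" < dGet d "access_level" := by
                rw [← hg]; exact hc
              rw [hkd, hgrp]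
              simp [pvEntry, hgrp ▸ hwf, winStep, hg, hc2]
            · have : pvGrp ((pvIds l)[k]) (l ++ [d]) = pvGrp ((pvIds l)[k]) l := by
                rw [pvGrp_append, if_neg (by simp only [beq_iff_eq]; exact fun e => hkd e.symm), List.append_nil]
              rw [this]
        · rw [ihAf i, hids]
          by_cases hi : i = keyOf d
          · subst hi
            rw [hwf]
            simp [winStep, hc]
          · have : pvGrp i (l ++ [d]) = pvGrp i l := by
              rw [pvGrp_append, if_neg (by simp only [beq_iff_eq]; exact fun e => hi e.symm), List.append_nil]
            rw [this]
    · -- fresh id: appended to ids, group is [d]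
      have hids : pvIds (l ++ [d]) = pvIds l ++ [keyOf d] := by
        rw [pvIds_append, idsStep, if_neg h]
      have hnone : (stateA l).1.get? (keyOf d) = none := by
        rw [ihAf, (PySem.List.index?_eq_none_iff _ _).2 h]; rfl
      have hgrpd : pvGrp (keyOf d) (l ++ [d]) = [d] := by
        rw [pvGrp_append, if_pos (by simp), pvGrp_eq_nil _ _ h, List.nil_append]
      have hn : ((((stateA l).2 ++ [d]).length : Int) - 1) = ((pvIds l).length : Int) := by
        rw [ihOut]
        simp [length_pvOut]
      have hstep2 : stateA (l ++ [d]) =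
          ((stateA l).1.insert (keyOf d) (dSet d "index" ((pvIds l).length : Int)),
           (stateA l).2 ++ [d]) := by
        rw [hstep]
        simp only [stepA, hkey, hnone, hn]
      rw [hstep2]
      refine ⟨?_, fun i => ?_⟩
      · show (stateA l).2 ++ [d] = pvOut (l ++ [d])
        have houtd : pvOut (l ++ [d]) = pvOut l ++ [d] := by
          rw [pvOut, hids, PySem.List.enumerate_append, List.map_append]
          congr 1
          · rw [pvOut]
            apply List.map_congr_left
            intro pi hpi
            obtain ⟨k, hk, rfl⟩ := (PySem.List.mem_enumerate_iff _ _ _).1 hpi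
            have hkne : (pvIds l)[k] ≠ keyOf d := fun e => h (e ▸ (pvIds l).getElem_mem hk)
            have : pvGrp ((pvIds l)[k]) (l ++ [d]) = pvGrp ((pvIds l)[k]) l := by
              rw [pvGrp_append, if_neg (by simp only [beq_iff_eq]; exact fun e => hkne e.symm), List.append_nil]
            rw [this]
          · rw [PySem.List.enumerate_cons, PySem.List.enumerate_nil, List.map_cons, List.map_nil]
            rw [hgrpd]
            rfl
        rw [ihOut, houtd]
      · rw [PySem.Dict.get?_insert, hids]
        by_cases hi : i = keyOf d
        · subst hi
          rw [if_pos rfl, PySem.List.index?_append_singleton_self _ _ h, hgrpd]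
          rfl
        · rw [if_neg hi, ihAf i]
          have hgrpi : pvGrp i (l ++ [d]) = pvGrp i l := by
            rw [pvGrp_append, if_neg (by simp only [beq_iff_eq]; exact fun e => hi e.symm), List.append_nil]
          rw [hgrpi]
          by_cases hm : i ∈ pvIds l
          · rw [PySem.List.index?_append_of_mem _ hm]
          · rw [(PySem.List.index?_eq_none_iff _ _).2 hm,
              (PySem.List.index?_eq_none_iff _ _).2 (by simp [hm, hi])]

-- the B-side folds
def stepB (st : List Int × PySem.Dict Int (List (List (String × Int))))
    (d : List (String × Int)) : List Int × PySem.Dict Int (List (List (String × Int))) :=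
  let objId := dGet d "id"
  match st.2.get? objId with
  | some g => (st.1, st.2.insert objId (g ++ [d]))
  | none => (st.1 ++ [objId], st.2.insert objId [d])

def stateB (l : List (List (String × Int))) :
    List Int × PySem.Dict Int (List (List (String × Int))) :=
  l.foldl stepB ([], PySem.Dict.empty)

theorem invB (l : List (List (String × Int))) :
    (stateB l).1 = pvIds l ∧
    ∀ i : Int, (stateB l).2.get? i = if i ∈ pvIds l then some (pvGrp i l) else none := by
  induction l using List.reverseRecOn with
  | nil =>
    refine ⟨rfl, fun i => ?_⟩
    simp [stateB, pvIds, PySem.Dict.get?_empty]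
  | append_singleton l d ih =>
    obtain ⟨ih1, ih2⟩ := ih
    have hstep : stateB (l ++ [d]) = stepB (stateB l) d := by
      simp [stateB, List.foldl_append]
    rw [hstep, stepB]
    have hkey : dGet d "id" = keyOf d := rfl
    rw [hkey, ih2 (keyOf d)]
    by_cases h : keyOf d ∈ pvIds l
    · rw [if_pos h]
      refine ⟨by rw [ih1, pvIds_append, idsStep, if_pos h], fun i => ?_⟩
      rw [PySem.Dict.get?_insert, pvIds_append, idsStep, if_pos h, ih2 i]
      by_cases hi : i = keyOf d
      · subst hi
        rw [if_pos rfl, if_pos h, pvGrp_append, if_pos (by simp)]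
      · rw [if_neg hi]
        by_cases hm : i ∈ pvIds l
        · rw [if_pos hm, if_pos hm, pvGrp_append, if_neg (by simp [Ne.symm hi]), List.append_nil]
        · rw [if_neg hm, if_neg hm]
    · rw [if_neg h]
      refine ⟨by rw [ih1, pvIds_append, idsStep, if_neg h], fun i => ?_⟩
      rw [PySem.Dict.get?_insert, pvIds_append, idsStep, if_neg h, ih2 i]
      by_cases hi : i = keyOf d
      · subst hi
        rw [if_pos rfl, if_pos (by simp), pvGrp_append, if_pos (by simp), pvGrp_eq_nil _ _ h,
          List.nil_append]
      · rw [if_neg hi]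
        by_cases hm : i ∈ pvIds l
        · rw [if_pos hm, if_pos (by simp [hm]), pvGrp_append, if_neg (by simp [Ne.symm hi]),
            List.append_nil]
        · rw [if_neg hm, if_neg (by simp [hm, hi])]

theorem foldl_emit (F : Int → Int → List (String × Int)) (os : List Int) (nl0 : List (List (String × Int))) :
    os.foldl (fun nl i => nl ++ [F i (nl.length : Int)]) nl0
      = nl0 ++ (PySem.List.enumerate os (nl0.length : Int)).map (fun pi => F pi.2 pi.1) := by
  induction os generalizing nl0 with
  | nil => simp [PySem.List.enumerate_nil]
  | cons x os ih =>
    rw [List.foldl_cons, ih, PySem.List.enumerate_cons]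
    simp [List.append_assoc]

theorem portB_eq_pvOut (my_list : List (List (String × Int))) :
    remove_dupes_but_take_higher_access_alt my_list = pvOut my_list := by
  obtain ⟨h1, h2⟩ := invB my_list
  show (stateB my_list).1.foldl (fun nl objId =>
      match (stateB my_list).2.getD objId [] with
      | [] => nl
      | g0 :: rest =>
          let wu := rest.foldl (fun (wu : List (String × Int) × Bool) d =>
              if dGet wu.1 "access_level" < dGet d "access_level" then (d, true) else wu) (g0, false)
          if wu.2 then nl ++ [dSet wu.1 "index" (nl.length : Int)] else nl ++ [g0]) [] = pvOut my_list
  rw [h1]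
  rw [PySem.List.foldl_congr_mem (pvIds my_list) _
    (fun nl i => nl ++ [pvEntry (pvGrp i my_list) (nl.length : Int)]) []
    (by
      intro nl i hi
      have hget : (stateB my_list).2.getD i [] = pvGrp i my_list := by
        rw [PySem.Dict.getD_eq_get?_getD, h2 i, if_pos hi]; rfl
      rw [hget]
      have hne : pvGrp i my_list ≠ [] := by
        obtain ⟨d, hd, hk⟩ := (mem_pvIds i my_list).1 hi
        intro hnil
        have : d ∈ pvGrp i my_list := by
          rw [pvGrp, List.mem_filter]; exact ⟨hd, by simp [hk]⟩
        rw [hnil] at this; exact absurd this (List.not_mem_nil)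
      obtain ⟨g0, rest, hg⟩ : ∃ g0 rest, pvGrp i my_list = g0 :: rest := by
        cases hgg : pvGrp i my_list with
        | nil => exact absurd hgg hne
        | cons a b => exact ⟨a, b, rfl⟩
      simp only [pvEntry, winFold, hg]
      have hw : (fun (wu : List (String × Int) × Bool) d =>
          if dGet wu.1 "access_level" < dGet d "access_level" then (d, true) else wu) = winStep := rfl
      rw [hw]
      split_ifs with hc <;> rfl)]
  rw [foldl_emit (F := fun i p => pvEntry (pvGrp i my_list) p) (pvIds my_list) []]
  simp [pvOut]

-- ===== VERDICT (by name: the statement is the Claim_ definition above) =====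
theorem remove_dupes_but_take_higher_access_spec : Claim_equal_remove_dupes_but_take_higher_access := by
  intro my_list _ _
  unfold Spec_remove_dupes_but_take_higher_access
  rw [portA_eq_stateA, (invA my_list).1, portB_eq_pvOut]
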